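-- pv_equiv track=rewrite | github.com/Oirefive/rassberry-assistant | src/rassberry_assistant/utils.py | number_to_words_ru
-- ===== SOURCE A (Python) =====
-- _UNITS = {
--     "masc": ["", "один", "два", "три", "четыре", "пять", "шесть", "семь", "восемь", "девять"],
--     "fem": ["", "одна", "две", "три", "четыре", "пять", "шесть", "семь", "восемь", "девять"],
-- }
--
-- _TEENS = {
--     10: "десять",
--     11: "одиннадцать",
--     12: "двенадцать",
--     13: "тринадцать",
--     14: "четырнадцать",
--     15: "пятнадцать",
--     16: "шестнадцать",
--     17: "семнадцать",
--     18: "восемнадцать",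
--     19: "девятнадцать",
-- }
--
-- _TENS = {
--     2: "двадцать",
--     3: "тридцать",
--     4: "сорок",
--     5: "пятьдесят",
--     6: "шестьдесят",
--     7: "семьдесят",
--     8: "восемьдесят",
--     9: "девяносто",
-- }
--
-- _HUNDREDS = {
--     1: "сто",
--     2: "двести",
--     3: "триста",
--     4: "четыреста",
--     5: "пятьсот",
--     6: "шестьсот",
--     7: "семьсот",
--     8: "восемьсот",
--     9: "девятьсот",
-- }
--
-- _SCALES = [
--     (1_000_000_000, ("миллиард", "миллиарда", "миллиардов"), "masc"),
--     (1_000_000, ("миллион", "миллиона", "миллионов"), "masc"),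
--     (1_000, ("тысяча", "тысячи", "тысяч"), "fem"),
-- ]
--
-- def _choose_plural(value: int, forms: tuple[str, str, str]) -> str:
--     remainder_100 = value % 100
--     remainder_10 = value % 10
--     if 11 <= remainder_100 <= 19:
--         return forms[2]
--     if remainder_10 == 1:
--         return forms[0]
--     if 2 <= remainder_10 <= 4:
--         return forms[1]
--     return forms[2]
--
-- def _triplet_to_words(value: int, gender: str = "masc") -> list[str]:
--     words: list[str] = []
--     if value >= 100:
--         words.append(_HUNDREDS[value // 100])
--         value %= 100
--     if 10 <= value <= 19:
--         words.append(_TEENS[value])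
--         return words
--     if value >= 20:
--         words.append(_TENS[value // 10])
--         value %= 10
--     if value:
--         words.append(_UNITS["fem" if gender == "fem" else "masc"][value])
--     return words
--
-- def number_to_words_ru(value: int, gender: str = "masc") -> str:
--     if value == 0:
--         return "ноль"
--     if value < 0:
--         return "минус " + number_to_words_ru(abs(value), gender=gender)
--
--     remainder = value
--     words: list[str] = []
--     for scale_value, scale_forms, scale_gender in _SCALES:
--         if remainder < scale_value:
--             continue
--         scale_count = remainder // scale_value
--         remainder %= scale_value
--         words.extend(_triplet_to_words(scale_count, gender=scale_gender))
--         words.append(_choose_plural(scale_count, scale_forms))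
--
--     if remainder:
--         words.extend(_triplet_to_words(remainder, gender=gender))
--     return " ".join(words).strip()
-- ===== SOURCE B (Python) =====
-- _UNITS = {
--     "masc": ["", "один", "два", "три", "четыре", "пять", "шесть", "семь", "восемь", "девять"],
--     "fem": ["", "одна", "две", "три", "четыре", "пять", "шесть", "семь", "восемь", "девять"],
-- }
--
-- _TEENS = {
--     10: "десять", 11: "одиннадцать", 12: "двенадцать", 13: "тринадцать",
--     14: "четырнадцать", 15: "пятнадцать", 16: "шестнадцать", 17: "семнадцать",
--     18: "восемнадцать", 19: "девятнадцать",
-- }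
--
-- _TENS = {
--     2: "двадцать", 3: "тридцать", 4: "сорок", 5: "пятьдесят",
--     6: "шестьдесят", 7: "семьдесят", 8: "восемьдесят", 9: "девяносто",
-- }
--
-- _HUNDREDS = {
--     1: "сто", 2: "двести", 3: "триста", 4: "четыреста", 5: "пятьсот",
--     6: "шестьсот", 7: "семьсот", 8: "восемьсот", 9: "девятьсот",
-- }
--
-- _SCALES = [
--     (1_000_000_000, ("миллиард", "миллиарда", "миллиардов"), "masc"),
--     (1_000_000, ("миллион", "миллиона", "миллионов"), "masc"),
--     (1_000, ("тысяча", "тысячи", "тысяч"), "fem"),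
-- ]
--
--
-- def _plural(value, forms):
--     r = value % 100
--     if not 11 <= r <= 19:
--         r %= 10
--         if r == 1:
--             return forms[0]
--         if 2 <= r <= 4:
--             return forms[1]
--     return forms[2]
--
--
-- def _triplet(value, gender):
--     h, t, u = value // 100, (value // 10) % 10, value % 10
--     words = []
--     if h:
--         words.append(_HUNDREDS[h])
--     if t == 1:
--         words.append(_TEENS[10 + u])
--     else:
--         if t >= 2:
--             words.append(_TENS[t])
--         if u:
--             words.append(_UNITS["fem" if gender == "fem" else "masc"][u])
--     return words
--
--
-- def _words(value, gender, scales):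
--     if not scales:
--         return _triplet(value, gender)
--     scale_value, forms, scale_gender = scales[0]
--     if value < scale_value:
--         return _words(value, gender, scales[1:])
--     quotient, rest = divmod(value, scale_value)
--     head = _triplet(quotient, scale_gender) + [_plural(quotient, forms)]
--     return head + (_words(rest, gender, scales[1:]) if rest else [])
--
--
-- def number_to_words_ru(value: int, gender: str = "masc") -> str:
--     if value == 0:
--         return "ноль"
--     if value < 0:
--         return "минус " + number_to_words_ru(-value, gender)
--     return " ".join(_words(value, gender, _SCALES))
-- ===== Notes on version B (the rewrite author's own statement) =====
-- stated objective: alternative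
-- what changed: Replaces A's flat accumulator loop over _SCALES (divide, mutate remainder, extend a shared words list, join+strip) with structural recursion over the scale-list suffix and a triplet builder that decomposes the value into hundreds/tens/units digits up front instead of sequentially mutating it.
import Mathlib
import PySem

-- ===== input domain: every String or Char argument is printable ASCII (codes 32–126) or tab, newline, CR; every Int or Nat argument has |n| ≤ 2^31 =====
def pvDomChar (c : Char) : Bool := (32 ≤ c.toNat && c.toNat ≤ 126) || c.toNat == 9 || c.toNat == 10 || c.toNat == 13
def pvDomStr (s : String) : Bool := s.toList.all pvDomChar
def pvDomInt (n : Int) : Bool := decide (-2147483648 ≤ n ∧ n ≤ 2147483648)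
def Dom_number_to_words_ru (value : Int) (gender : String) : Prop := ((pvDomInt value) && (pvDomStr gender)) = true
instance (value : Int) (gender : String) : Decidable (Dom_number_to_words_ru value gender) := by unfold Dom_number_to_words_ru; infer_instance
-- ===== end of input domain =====

-- B replaces A's flat accumulator loop over _SCALES with structural recursion over the
-- scale list and a digit-decomposed triplet builder (objective: alternative decomposition).

-- shared module constants (identical in both Python files)
def pvUnitsMasc : List String := ["", "один", "два", "три", "четыре", "пять", "шесть", "семь", "восемь", "девять"]
def pvUnitsFem : List String := ["", "одна", "две", "три", "четыре", "пять", "шесть", "семь", "восемь", "девять"]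
def pvTeens : PySem.Dict Int String := PySem.Dict.ofList
  [(10, "десять"), (11, "одиннадцать"), (12, "двенадцать"), (13, "тринадцать"),
   (14, "четырнадцать"), (15, "пятнадцать"), (16, "шестнадцать"), (17, "семнадцать"),
   (18, "восемнадцать"), (19, "девятнадцать")]
def pvTens : PySem.Dict Int String := PySem.Dict.ofList
  [(2, "двадцать"), (3, "тридцать"), (4, "сорок"), (5, "пятьдесят"),
   (6, "шестьдесят"), (7, "семьдесят"), (8, "восемьдесят"), (9, "девяносто")]
def pvHundreds : PySem.Dict Int String := PySem.Dict.ofList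
  [(1, "сто"), (2, "двести"), (3, "триста"), (4, "четыреста"), (5, "пятьсот"),
   (6, "шестьсот"), (7, "семьсот"), (8, "восемьсот"), (9, "девятьсот")]
def pvScales : List (Int × (String × String × String) × String) :=
  [(1000000000, ("миллиард", "миллиарда", "миллиардов"), "masc"),
   (1000000, ("миллион", "миллиона", "миллионов"), "masc"),
   (1000, ("тысяча", "тысячи", "тысяч"), "fem")]

-- ===== PORT A =====
-- _choose_plural (A)
def pvChoosePluralA (value : Int) (forms : String × String × String) : String :=
  let remainder100 := PySem.Int.mod value 100
  let remainder10 := PySem.Int.mod value 10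
  if 11 ≤ remainder100 ∧ remainder100 ≤ 19 then forms.2.2
  else if remainder10 = 1 then forms.1
  else if 2 ≤ remainder10 ∧ remainder10 ≤ 4 then forms.2.1
  else forms.2.2

-- _triplet_to_words (A): sequential mutation of `value`, ported as rebinding.
-- Dict lookups that Python would KeyError on are getD ""; on every admitted input the keys are present.
def pvTripletA (value : Int) (gender : String) : List String :=
  let words : List String := []
  let (words, value) :=
    if value ≥ 100 then
      (words ++ [pvHundreds.getD (PySem.Int.floordiv value 100) ""], PySem.Int.mod value 100)
    else (words, value)
  if 10 ≤ value ∧ value ≤ 19 then words ++ [pvTeens.getD value ""]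
  else
    let (words, value) :=
      if value ≥ 20 then
        (words ++ [pvTens.getD (PySem.Int.floordiv value 10) ""], PySem.Int.mod value 10)
      else (words, value)
    if value ≠ 0 then
      words ++ [PySem.List.pyGetD (if gender == "fem" then pvUnitsFem else pvUnitsMasc) value ""]
    else words

def number_to_words_ru (value : Int) (gender : String) : String :=
  if value = 0 then "ноль"
  else if value < 0 then "минус " ++ number_to_words_ru (-value) gender
  else
    let st := pvScales.foldl
      (fun (st : Int × List String) sc =>
        let scale_value := sc.1
        let scale_forms := sc.2.1
        let scale_gender := sc.2.2
        if st.1 < scale_value then st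
        else
          let scale_count := PySem.Int.floordiv st.1 scale_value
          let remainder := PySem.Int.mod st.1 scale_value
          (remainder, st.2 ++ pvTripletA scale_count scale_gender ++ [pvChoosePluralA scale_count scale_forms]))
      (value, [])
    let words := if st.1 ≠ 0 then st.2 ++ pvTripletA st.1 gender else st.2
    PySem.Str.strip (PySem.Str.join " " words)
termination_by (if value < 0 then 1 else 0)
decreasing_by simp_all; omega

-- ===== PORT B =====
-- _plural (B)
def pvPluralB (value : Int) (forms : String × String × String) : String :=
  let r := PySem.Int.mod value 100
  if ¬ (11 ≤ r ∧ r ≤ 19) then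
    let r2 := PySem.Int.mod r 10
    if r2 = 1 then forms.1
    else if 2 ≤ r2 ∧ r2 ≤ 4 then forms.2.1
    else forms.2.2
  else forms.2.2

-- _triplet (B): digit decomposition h/t/u
def pvTripletB (value : Int) (gender : String) : List String :=
  let h := PySem.Int.floordiv value 100
  let t := PySem.Int.mod (PySem.Int.floordiv value 10) 10
  let u := PySem.Int.mod value 10
  (if h ≠ 0 then [pvHundreds.getD h ""] else []) ++
  (if t = 1 then [pvTeens.getD (10 + u) ""]
   else
     (if 2 ≤ t then [pvTens.getD t ""] else []) ++
     (if u ≠ 0 then [PySem.List.pyGetD (if gender == "fem" then pvUnitsFem else pvUnitsMasc) u ""] else []))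

-- _words (B): structural recursion over the scale list
def pvWordsB (value : Int) (gender : String) : List (Int × (String × String × String) × String) → List String
  | [] => pvTripletB value gender
  | (scale_value, forms, scale_gender) :: rest =>
    if value < scale_value then pvWordsB value gender rest
    else
      let quotient := PySem.Int.floordiv value scale_value
      let r := PySem.Int.mod value scale_value
      pvTripletB quotient scale_gender ++ [pvPluralB quotient forms] ++
        (if r ≠ 0 then pvWordsB r gender rest else [])

def number_to_words_ru_alt (value : Int) (gender : String) : String :=
  if value = 0 then "ноль"
  else if value < 0 then "минус " ++ number_to_words_ru_alt (-value) gender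
  else PySem.Str.join " " (pvWordsB value gender pvScales)
termination_by (if value < 0 then 1 else 0)
decreasing_by simp_all; omega

-- ===== PRECONDITION & SPEC =====
def Spec_number_to_words_ru (value : Int) (gender : String) (out : String) : Prop := out = number_to_words_ru_alt value gender
instance (value : Int) (gender : String) (out : String) : Decidable (Spec_number_to_words_ru value gender out) := by unfold Spec_number_to_words_ru; infer_instance

-- ===== CLAIM (what is proved, stated in full; the proofs are below) =====
def Claim_equal_number_to_words_ru : Prop := ∀ (value : Int) (gender : String), Dom_number_to_words_ru value gender → Spec_number_to_words_ru value gender (number_to_words_ru value gender)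

-- ===== LEMMAS AND PROOFS =====

-- the two plural helpers agree everywhere
lemma plural_eq (v : Int) (forms : String × String × String) :
    pvChoosePluralA v forms = pvPluralB v forms := by
  unfold pvChoosePluralA pvPluralB
  simp only [PySem.Int.mod_eq_emod_of_pos (show (0:Int) < 100 by norm_num),
             PySem.Int.mod_eq_emod_of_pos (show (0:Int) < 10 by norm_num)]
  have h : v % 100 % 10 = v % 10 := by omega
  simp only [h]
  split_ifs <;> first | rfl | omega

-- the two triplet builders agree on every nonnegative value
lemma triplet_eq (v : Int) (h0 : 0 ≤ v) (g : String) :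
    pvTripletA v g = pvTripletB v g := by
  unfold pvTripletA pvTripletB
  simp only [PySem.Int.floordiv_eq_ediv_of_pos (show (0:Int) < 100 by norm_num),
             PySem.Int.floordiv_eq_ediv_of_pos (show (0:Int) < 10 by norm_num),
             PySem.Int.mod_eq_emod_of_pos (show (0:Int) < 100 by norm_num),
             PySem.Int.mod_eq_emod_of_pos (show (0:Int) < 10 by norm_num)]
  split_ifs <;> try omega
  all_goals simp_all
  all_goals (first | rfl | omega | (congr 1 <;> omega))

-- A's foldl over the scales produces exactly B's recursive word list (plus the accumulator)
lemma fold_words (g : String) (scales : List (Int × (String × String × String) × String))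
    (hpos : ∀ s ∈ scales, 0 < s.1) (v : Int) (h0 : 0 ≤ v) (acc : List String) :
    (let st := scales.foldl
      (fun (st : Int × List String) sc =>
        let scale_value := sc.1
        let scale_forms := sc.2.1
        let scale_gender := sc.2.2
        if st.1 < scale_value then st
        else
          let scale_count := PySem.Int.floordiv st.1 scale_value
          let remainder := PySem.Int.mod st.1 scale_value
          (remainder, st.2 ++ pvTripletA scale_count scale_gender ++ [pvChoosePluralA scale_count scale_forms]))
      (v, acc)
     if st.1 ≠ 0 then st.2 ++ pvTripletA st.1 g else st.2)
    = acc ++ (if v ≠ 0 then pvWordsB v g scales else []) := by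
  induction scales generalizing v acc with
  | nil =>
    simp only [List.foldl_nil, pvWordsB]
    split_ifs with h
    · rw [triplet_eq v h0 g]
    · simp
  | cons s rest ih =>
    obtain ⟨sv, forms, sg⟩ := s
    have hsv : 0 < sv := hpos (sv, forms, sg) (by simp)
    simp only [List.foldl_cons]
    by_cases hlt : v < sv
    · simp only [if_pos hlt]
      rw [ih (fun s hs => hpos s (by simp [hs])) v h0 acc]
      have : pvWordsB v g ((sv, forms, sg) :: rest) = pvWordsB v g rest := by
        rw [pvWordsB, if_pos hlt]
      rw [this]
    · simp only [if_neg hlt]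
      have hq0 : 0 ≤ PySem.Int.mod v sv := PySem.Int.mod_nonneg _ hsv
      rw [ih (fun s hs => hpos s (by simp [hs])) (PySem.Int.mod v sv) hq0]
      have hv0 : v ≠ 0 := by omega
      have hBrw : pvWordsB v g ((sv, forms, sg) :: rest)
          = pvTripletB (PySem.Int.floordiv v sv) sg ++ [pvPluralB (PySem.Int.floordiv v sv) forms] ++
            (if PySem.Int.mod v sv ≠ 0 then pvWordsB (PySem.Int.mod v sv) g rest else []) := by
        rw [pvWordsB, if_neg hlt]
      rw [if_pos hv0, hBrw]
      have hqnn : 0 ≤ PySem.Int.floordiv v sv := by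
        rw [PySem.Int.floordiv_eq_ediv_of_pos hsv]
        exact Int.ediv_nonneg h0 (le_of_lt hsv)
      rw [triplet_eq _ hqnn sg, plural_eq]
      simp [List.append_assoc]

-- a word is "good" when nonempty and free of Python whitespace
def pvGood (w : String) : Bool := !w.toList.isEmpty && w.toList.all (fun c => !PySem.Chars.isspace c)

lemma good_hundreds (k : Int) (h : 1 ≤ k ∧ k ≤ 9) : pvGood (pvHundreds.getD k "") = true := by
  obtain ⟨h1, h2⟩ := h; interval_cases k <;> decide

lemma good_teens (k : Int) (h : 10 ≤ k ∧ k ≤ 19) : pvGood (pvTeens.getD k "") = true := by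
  obtain ⟨h1, h2⟩ := h; interval_cases k <;> decide

lemma good_tens (k : Int) (h : 2 ≤ k ∧ k ≤ 9) : pvGood (pvTens.getD k "") = true := by
  obtain ⟨h1, h2⟩ := h; interval_cases k <;> decide

lemma good_unitsF (k : Int) (h : 1 ≤ k ∧ k ≤ 9) :
    pvGood (PySem.List.pyGetD pvUnitsFem k "") = true := by
  obtain ⟨h1, h2⟩ := h; interval_cases k <;> decide

lemma good_unitsM (k : Int) (h : 1 ≤ k ∧ k ≤ 9) :
    pvGood (PySem.List.pyGetD pvUnitsMasc k "") = true := by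
  obtain ⟨h1, h2⟩ := h; interval_cases k <;> decide

lemma good_plural (v : Int) (forms : String × String × String)
    (hf : pvGood forms.1 = true ∧ pvGood forms.2.1 = true ∧ pvGood forms.2.2 = true) :
    pvGood (pvPluralB v forms) = true := by
  simp only [pvPluralB]
  split_ifs <;> simp [hf.1, hf.2.1, hf.2.2]

lemma triplet_good (v : Int) (h0 : 0 ≤ v) (h1 : v < 1000) (g : String) :
    (pvTripletB v g).all pvGood = true := by
  unfold pvTripletB
  simp only [PySem.Int.floordiv_eq_ediv_of_pos (show (0:Int) < 100 by norm_num),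
             PySem.Int.floordiv_eq_ediv_of_pos (show (0:Int) < 10 by norm_num),
             PySem.Int.mod_eq_emod_of_pos (show (0:Int) < 10 by norm_num)]
  split_ifs
  all_goals simp only [List.all_append, List.all_cons, List.all_nil, Bool.and_eq_true, Bool.and_true]
  all_goals (repeat' apply And.intro)
  · exact good_hundreds _ ⟨by omega, by omega⟩
  · exact good_teens _ ⟨by omega, by omega⟩
  · exact good_hundreds _ ⟨by omega, by omega⟩
  · exact good_tens _ ⟨by omega, by omega⟩
  · exact good_unitsF _ ⟨by omega, by omega⟩
  · exact good_hundreds _ ⟨by omega, by omega⟩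
  · exact good_tens _ ⟨by omega, by omega⟩
  · exact good_unitsM _ ⟨by omega, by omega⟩
  · exact good_hundreds _ ⟨by omega, by omega⟩
  · exact good_tens _ ⟨by omega, by omega⟩
  · exact good_hundreds _ ⟨by omega, by omega⟩
  · trivial
  · exact good_unitsF _ ⟨by omega, by omega⟩
  · exact good_hundreds _ ⟨by omega, by omega⟩
  · trivial
  · exact good_unitsM _ ⟨by omega, by omega⟩
  · exact good_hundreds _ ⟨by omega, by omega⟩
  · trivial
  · exact good_teens _ ⟨by omega, by omega⟩
  · trivial
  · exact good_tens _ ⟨by omega, by omega⟩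
  · exact good_unitsF _ ⟨by omega, by omega⟩
  · trivial
  · exact good_tens _ ⟨by omega, by omega⟩
  · exact good_unitsM _ ⟨by omega, by omega⟩
  · trivial
  · exact good_tens _ ⟨by omega, by omega⟩
  · trivial
  · trivial
  · exact good_unitsF _ ⟨by omega, by omega⟩
  · trivial
  · trivial
  · exact good_unitsM _ ⟨by omega, by omega⟩

lemma triplet_ne (v : Int) (h0 : 0 < v) (h1 : v < 1000) (g : String) :
    pvTripletB v g ≠ [] := by
  unfold pvTripletB
  simp only [PySem.Int.floordiv_eq_ediv_of_pos (show (0:Int) < 100 by norm_num),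
             PySem.Int.floordiv_eq_ediv_of_pos (show (0:Int) < 10 by norm_num),
             PySem.Int.mod_eq_emod_of_pos (show (0:Int) < 10 by norm_num)]
  split_ifs <;> simp <;> omega

-- the upper bound each scale suffix keeps the current value under
def pvLimit : List (Int × (String × String × String) × String) → Int
  | [] => 1000
  | s :: _ => 1000 * s.1

-- well-formedness of a scale list: positive descending scales with good plural forms
def pvChain : List (Int × (String × String × String) × String) → Prop
  | [] => True
  | s :: rest => 0 < s.1 ∧ s.1 ≤ pvLimit rest ∧
      (pvGood s.2.1.1 = true ∧ pvGood s.2.1.2.1 = true ∧ pvGood s.2.1.2.2 = true) ∧ pvChain rest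

lemma wordsB_all_good (scales : List (Int × (String × String × String) × String))
    (hc : pvChain scales) (v : Int) (g : String) (h0 : 0 ≤ v) (hlim : v < pvLimit scales) :
    (pvWordsB v g scales).all pvGood = true := by
  induction scales generalizing v with
  | nil => exact triplet_good v h0 (by simpa [pvLimit] using hlim) g
  | cons s rest ih =>
    obtain ⟨sv, forms, sg⟩ := s
    obtain ⟨hsv, hle, hforms, hrest⟩ := hc
    dsimp only at hsv hle hforms
    simp only [pvLimit] at hlim
    rw [pvWordsB]
    dsimp only
    have hqb : PySem.Int.floordiv v sv < 1000 :=
      (PySem.Int.floordiv_lt_iff_lt_mul hsv).mpr hlim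
    have hq0 : 0 ≤ PySem.Int.floordiv v sv :=
      (PySem.Int.le_floordiv_iff_mul_le hsv).mpr (by nlinarith)
    have hr0 : 0 ≤ PySem.Int.mod v sv := PySem.Int.mod_nonneg _ hsv
    have hrlt : PySem.Int.mod v sv < pvLimit rest :=
      lt_of_lt_of_le (PySem.Int.mod_lt v hsv) hle
    split_ifs with hlt hr
    · exact ih hrest v h0 (lt_of_lt_of_le hlt hle)
    · simp only [List.all_append, List.all_cons, List.all_nil, Bool.and_eq_true, Bool.and_true]
      (repeat' apply And.intro) <;>
        first
          | trivial
          | exact triplet_good _ hq0 hqb sg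
          | exact good_plural _ _ hforms
          | exact ih hrest _ hr0 hrlt
    · simp only [List.all_append, List.all_cons, List.all_nil, Bool.and_eq_true, Bool.and_true]
      (repeat' apply And.intro) <;>
        first
          | trivial
          | exact triplet_good _ hq0 hqb sg
          | exact good_plural _ _ hforms

lemma wordsB_ne (scales : List (Int × (String × String × String) × String))
    (hc : pvChain scales) (v : Int) (g : String) (h0 : 0 < v) (hlim : v < pvLimit scales) :
    pvWordsB v g scales ≠ [] := by
  induction scales generalizing v with
  | nil => exact triplet_ne v h0 (by simpa [pvLimit] using hlim) g
  | cons s rest ih =>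
    obtain ⟨sv, forms, sg⟩ := s
    obtain ⟨hsv, hle, hforms, hrest⟩ := hc
    dsimp only at hsv hle hforms
    rw [pvWordsB]
    split_ifs with hlt
    · exact ih hrest v h0 (lt_of_lt_of_le hlt hle)
    all_goals
      intro hc
      have h2 := (List.append_eq_nil_iff.mp (List.append_eq_nil_iff.mp hc).1).2
      simp at h2

lemma dropWhile_noop (p : Char → Bool) (cs : List Char)
    (h : ∀ c, cs.head? = some c → p c = false) : cs.dropWhile p = cs := by
  cases cs with
  | nil => rfl
  | cons a l => simp [h a rfl]

lemma chars_strip_noop (cs : List Char)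
    (hhead : ∀ c, cs.head? = some c → PySem.Chars.isspace c = false)
    (hlast : ∀ c, cs.getLast? = some c → PySem.Chars.isspace c = false) :
    PySem.Chars.strip cs = cs := by
  unfold PySem.Chars.strip PySem.Chars.lstrip PySem.Chars.rstrip
  rw [dropWhile_noop _ _ hhead]
  rw [dropWhile_noop _ _ (by simpa using hlast)]
  simp

lemma head_inter (sep : List Char) (ws : List (List Char)) (w : List Char) (hw : ws = w :: ws.tail) :
    (List.intercalate sep ws).head? = w.head? ∨ w = [] := by
  by_cases h : w = []
  · right; exact h
  · left
    rw [hw]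
    cases ht : ws.tail with
    | nil => simp [List.intercalate]
    | cons y xs =>
      have : List.intercalate sep (w :: y :: xs) = w ++ (sep ++ List.intercalate sep (y :: xs)) := by
        simp [List.intercalate, List.intersperse]
      rw [this, List.head?_append_of_ne_nil _ h]

lemma last_inter (sep : List Char) (ws : List (List Char)) (hg : ∀ w ∈ ws, w ≠ []) :
    ∀ c, (List.intercalate sep ws).getLast? = some c → ∃ w ∈ ws, w.getLast? = some c := by
  induction ws with
  | nil => intro c hc; simp [List.intercalate] at hc
  | cons w rest ih =>
    intro c hc
    cases rest with
    | nil =>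
      simp [List.intercalate] at hc
      exact ⟨w, by simp, hc⟩
    | cons y xs =>
      have hrw : List.intercalate sep (w :: y :: xs) = w ++ (sep ++ List.intercalate sep (y :: xs)) := by
        simp [List.intercalate, List.intersperse]
      rw [hrw] at hc
      have hi : List.intercalate sep (y :: xs) ≠ [] := by
        cases xs with
        | nil =>
          have h1 : List.intercalate sep [y] = y := by simp [List.intercalate]
          rw [h1]; exact hg y (by simp)
        | cons z zs =>
          have : List.intercalate sep (y :: z :: zs) = y ++ (sep ++ List.intercalate sep (z :: zs)) := by
            simp [List.intercalate, List.intersperse]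
          rw [this]
          exact List.append_ne_nil_of_left_ne_nil (hg y (by simp)) _
      rw [List.getLast?_append_of_ne_nil _ (by simp [hi]), List.getLast?_append_of_ne_nil _ hi] at hc
      obtain ⟨v, hv, hvc⟩ := ih (fun u hu => hg u (by simp [hu])) c hc
      exact ⟨v, by simp [hv], hvc⟩

lemma strip_join_eq (ws : List String) (hne : ws ≠ []) (hg : ∀ w ∈ ws, pvGood w = true) :
    PySem.Str.strip (PySem.Str.join " " ws) = PySem.Str.join " " ws := by
  unfold PySem.Str.strip PySem.Str.join PySem.Chars.join
  have hgood : ∀ w ∈ ws.map String.toList, w ≠ [] ∧ ∀ c ∈ w, PySem.Chars.isspace c = false := by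
    intro w hw
    simp at hw
    obtain ⟨s, hs, rfl⟩ := hw
    have := hg s hs
    unfold pvGood at this
    simp at this
    constructor
    · intro h
      exact this.1 (by rw [← String.ofList_toList (s := s), h])
    · exact fun c hc => this.2 c hc
  congr 1
  rw [String.toList_ofList]
  apply chars_strip_noop
  · intro c hc
    obtain ⟨w, rest, hrw⟩ : ∃ w rest, ws.map String.toList = w :: rest := by
      cases h : ws.map String.toList with
      | nil => simp at h; exact absurd h hne
      | cons a l => exact ⟨a, l, rfl⟩
    rcases head_inter " ".toList (ws.map String.toList) w (by rw [hrw]; rfl) with h | h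
    · rw [h] at hc
      have hwmem := hgood w (by rw [hrw]; simp)
      exact hwmem.2 c (List.mem_of_mem_head? hc)
    · exact absurd h (hgood w (by rw [hrw]; simp)).1
  · intro c hc
    obtain ⟨w, hw, hwc⟩ := last_inter " ".toList (ws.map String.toList)
      (fun u hu => (hgood u hu).1) c hc
    exact (hgood w hw).2 c (List.mem_of_mem_getLast? hwc)

lemma chain_pvScales : pvChain pvScales := by
  refine ⟨by norm_num, by norm_num [pvLimit], ⟨by decide, by decide, by decide⟩,
          by norm_num, by norm_num [pvLimit], ⟨by decide, by decide, by decide⟩,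
          by norm_num, by norm_num [pvLimit], ⟨by decide, by decide, by decide⟩, trivial⟩

lemma pos_eq (v : Int) (g : String) (h0 : 0 < v) (hb : v ≤ 2147483648) :
    number_to_words_ru v g = number_to_words_ru_alt v g := by
  rw [number_to_words_ru, number_to_words_ru_alt]
  rw [if_neg (by omega : ¬ v = 0), if_neg (by omega : ¬ v < 0),
      if_neg (by omega : ¬ v = 0), if_neg (by omega : ¬ v < 0)]
  have hfold := fold_words g pvScales (by intro s hs; fin_cases hs <;> norm_num) v (le_of_lt h0) []
  simp only at hfold ⊢
  rw [hfold, if_pos (by omega : v ≠ 0), List.nil_append]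
  have hlim : v < pvLimit pvScales := by simp only [pvScales, pvLimit]; omega
  refine strip_join_eq _ (wordsB_ne pvScales chain_pvScales v g h0 hlim) ?_
  have := wordsB_all_good pvScales chain_pvScales v g (le_of_lt h0) hlim
  simpa [List.all_eq_true] using this

-- ===== VERDICT (by name: the statement is the Claim_ definition above) =====
theorem number_to_words_ru_spec : Claim_equal_number_to_words_ru := by
  intro value gender hdom
  unfold Spec_number_to_words_ru
  have hd : -2147483648 ≤ value ∧ value ≤ 2147483648 := by
    simp only [Dom_number_to_words_ru, pvDomInt, Bool.and_eq_true, decide_eq_true_eq] at hdom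
    exact hdom.1
  rcases lt_trichotomy value 0 with hneg | hz | hpos
  · rw [number_to_words_ru, number_to_words_ru_alt]
    rw [if_neg (by omega : ¬ value = 0), if_pos hneg, if_neg (by omega : ¬ value = 0), if_pos hneg]
    rw [pos_eq (-value) gender (by omega) (by omega)]
  · subst hz
    rw [number_to_words_ru, number_to_words_ru_alt]
    norm_num
  · exact pos_eq value gender hpos hd.2
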